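-- pv_equiv track=rewrite | github.com/THUNLP-MT/PS-VAE | src/utils/chem_utils.py | bfs_morgan_order_extended_by_admat
-- ===== SOURCE A (Python) =====
-- import heapq
--
-- def bfs_morgan_order_extended_by_admat(admat):
--     # get root and id2flow
--     id2flow = {}
--     for i, row in enumerate(admat):
--         id2flow[i] = sum(row)
--     k = len(set(id2flow.values()))
--     while True:
--         new_id2flow = {}
--         for i, row in enumerate(admat):
--             new_id2flow[i] = 0
--             for j, has_edge in enumerate(row):
--                 if not has_edge:
--                     continue
--                 new_id2flow[i] += id2flow[j]
--         new_k = len(set(new_id2flow.values()))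
--         if new_k <= k:
--             break
--         else:
--             k, id2flow = new_k, new_id2flow
--     root_idx, _ = min(id2flow.items(), key=lambda x: x[1])
--     # extended bfs order. Nodes with lower flow value has higher priority
--     heap = []
--     heapq.heappush(heap, (id2flow[root_idx],root_idx))
--     visited = {}
--     order_list = []
--     idx2order = {}
--     visited[root_idx] = True
--     while len(heap):
--         _, next_id = heapq.heappop(heap)
--         idx2order[next_id] = len(order_list)
--         order_list.append(next_id)
--         neis = []
--         for nei_id, has_edge in enumerate(admat[next_id]):
--             if not has_edge:
--                 continue
--             if nei_id not in visited:
--                 visited[nei_id] = True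
--                 heapq.heappush(heap, (id2flow[nei_id], nei_id))
--     return order_list, idx2order
-- ===== SOURCE B (Python) =====
-- def bfs_morgan_order_extended_by_admat(admat):
--     # phase 1: Morgan relaxation on plain lists instead of dicts
--     flows = [sum(row) for row in admat]
--     k = len(set(flows))
--     while True:
--         new_flows = [sum(f for e, f in zip(row, flows) if e) for row in admat]
--         new_k = len(set(new_flows))
--         if new_k <= k:
--             break
--         k, flows = new_k, new_flows
--     # phase 2: frontier kept as a set; each step take the node with the
--     # smallest (flow, id) key by a linear min scan (key is injective, so the
--     # scan order over the set cannot matter)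
--     root = min(range(len(admat)), key=lambda i: (flows[i], i))
--     frontier = {root}
--     seen = {root}
--     order_list = []
--     while frontier:
--         nxt = min(frontier, key=lambda i: (flows[i], i))
--         frontier.discard(nxt)
--         order_list.append(nxt)
--         for j, e in enumerate(admat[nxt]):
--             if e and j not in seen:
--                 seen.add(j)
--                 frontier.add(j)
--     return order_list, {v: i for i, v in enumerate(order_list)}
-- ===== Notes on version B (the rewrite author's own statement) =====
-- stated objective: alternative
-- what changed: Phase 1 runs the Morgan relaxation on plain lists (zip-sum per row) instead of dicts, and phase 2 replaces the heapq priority queue by a frontier set from which each step extracts the node with the smallest (flow, id) key by a linear min scan; idx2order is built once from the finished order instead of incrementally.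
import Mathlib
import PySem

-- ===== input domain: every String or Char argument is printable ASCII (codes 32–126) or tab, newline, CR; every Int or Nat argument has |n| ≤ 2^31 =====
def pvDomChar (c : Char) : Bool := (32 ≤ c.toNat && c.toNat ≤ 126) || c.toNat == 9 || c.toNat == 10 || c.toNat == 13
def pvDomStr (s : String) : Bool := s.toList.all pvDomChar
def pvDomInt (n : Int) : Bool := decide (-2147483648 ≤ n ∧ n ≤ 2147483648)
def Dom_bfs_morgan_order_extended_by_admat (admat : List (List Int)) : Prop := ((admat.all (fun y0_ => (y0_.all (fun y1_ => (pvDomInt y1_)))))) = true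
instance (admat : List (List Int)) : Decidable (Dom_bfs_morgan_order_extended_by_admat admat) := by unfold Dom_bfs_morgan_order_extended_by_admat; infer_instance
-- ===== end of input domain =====

-- B replaces A's dict-based Morgan relaxation by list arithmetic and A's heapq frontier by a
-- set with a linear min scan (objective: alternative). Return value only; nothing is mutated.

-- ===== PORT A =====
-- Python tuple '<' on (Int, Int) pairs (heapq compares the pushed tuples lexicographically)
def pvLexLt (p q : Int × Int) : Bool := p.1 < q.1 || (p.1 == q.1 && p.2 < q.2)

-- heapq modelled as a list kept sorted: heappush = ordered insert, heappop = take the head.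
-- Observably exact here: heappop returns the minimum and all pushed pairs are distinct.
def pvHeapPush : List (Int × Int) → Int × Int → List (Int × Int)
  | [], p => [p]
  | q :: t, p => if pvLexLt p q then p :: q :: t else q :: pvHeapPush t p

-- 'for j, has_edge in enumerate(row): … new_id2flow[i] += id2flow[j]'
-- (id2flow[j] would raise KeyError for a nonzero entry with j out of range: excluded by Pre_,
--  so the total form getD 0 is exact there)
def pvRelaxRowA (flow : PySem.Dict Int Int) (i : Int) (row : List Int)
    (nd : PySem.Dict Int Int) : PySem.Dict Int Int :=
  (PySem.List.enumerate row).foldl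
    (fun d p => if p.2 == 0 then d else d.insert i (d.getD i 0 + flow.getD p.1 0))
    (nd.insert i 0)

def pvStepA (admat : List (List Int)) (flow : PySem.Dict Int Int) : PySem.Dict Int Int :=
  (PySem.List.enumerate admat).foldl (fun nd p => pvRelaxRowA flow p.1 p.2 nd) PySem.Dict.empty

-- the 'while True' relaxation loop; fuel is a totality guard only (k strictly grows and is
-- bounded by the number of nodes, so the Python loop breaks within |admat|+1 rounds)
def pvMorganA (admat : List (List Int)) : Nat → PySem.Dict Int Int → Nat → PySem.Dict Int Int
  | 0, flow, _ => flow
  | fuel+1, flow, k =>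
      let nd := pvStepA admat flow
      let nk := (PySem.Set.ofList nd.values).length
      if nk ≤ k then flow else pvMorganA admat fuel nd nk

-- the 'while len(heap)' loop; fuel is a totality guard only (every node is pushed at most once)
def pvBfsA (admat : List (List Int)) (flow : PySem.Dict Int Int) :
    Nat → List (Int × Int) → PySem.Dict Int Bool → List Int → PySem.Dict Int Int →
    List Int × List (Int × Int)
  | 0, _, _, order, idx => (order, idx.items)
  | _+1, [], _, order, idx => (order, idx.items)
  | fuel+1, (_, nid) :: rest, visited, order, idx =>
      let idx' := idx.insert nid (order.length : Int)
      let order' := order ++ [nid]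
      let hv := (PySem.List.enumerate (PySem.List.pyGetD admat nid [])).foldl
        (fun (hv : List (Int × Int) × PySem.Dict Int Bool) p =>
          if p.2 == 0 then hv
          else if hv.2.contains p.1 then hv
          else (pvHeapPush hv.1 (flow.getD p.1 0, p.1), hv.2.insert p.1 true))
        (rest, visited)
      pvBfsA admat flow fuel hv.1 hv.2 order' idx'

def bfs_morgan_order_extended_by_admat (admat : List (List Int)) : List Int × (List (Int × Int)) :=
  let flow0 := (PySem.List.enumerate admat).foldl
    (fun d (p : Int × List Int) => d.insert p.1 p.2.sum) PySem.Dict.empty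
  let k0 := (PySem.Set.ofList flow0.values).length
  let flow := pvMorganA admat (admat.length + 1) flow0 k0
  -- min(id2flow.items(), key=lambda x: x[1]); on an empty dict Python raises ValueError
  -- (excluded by Pre_), the default (0, 0) is unreachable there
  let root := (PySem.List.minD flow.items (fun x => x.2) (0, 0)).1
  let heap := pvHeapPush [] (flow.getD root 0, root)
  let visited := PySem.Dict.empty.insert root true
  pvBfsA admat flow admat.length heap visited [] PySem.Dict.empty

-- ===== PORT B =====
-- Python's key lambda i: (flows[i], i) — tuples compare lexicographically
def pvKeyB (flows : List Int) (i : Int) : Lex (Int × Int) :=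
  toLex (PySem.List.pyGetD flows i 0, i)

-- '[sum(f for e, f in zip(row, flows) if e) for row in admat]'
def pvStepB (admat : List (List Int)) (flows : List Int) : List Int :=
  admat.map (fun row => (((row.zip flows).filter (fun p => !(p.1 == 0))).map (·.2)).sum)

def pvMorganB (admat : List (List Int)) : Nat → List Int → Nat → List Int
  | 0, flows, _ => flows
  | fuel+1, flows, k =>
      let nf := pvStepB admat flows
      let nk := (PySem.Set.ofList nf).length
      if nk ≤ k then flows else pvMorganB admat fuel nf nk

-- the 'while frontier' loop; fuel is a totality guard only (every node enters the frontier once)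
def pvBfsB (admat : List (List Int)) (flows : List Int) :
    Nat → PySem.Set Int → PySem.Set Int → List Int → List Int
  | 0, _, _, order => order
  | fuel+1, frontier, seen, order =>
    match frontier with
    | [] => order
    | _ :: _ =>
      -- min over the frontier set: the key is injective, so the scan order cannot matter
      let nxt := PySem.List.minD frontier (pvKeyB flows) 0
      let frontier' := PySem.Set.discard frontier nxt
      let order' := order ++ [nxt]
      let fs := (PySem.List.enumerate (PySem.List.pyGetD admat nxt [])).foldl
        (fun (fs : PySem.Set Int × PySem.Set Int) p =>
          if !(p.2 == 0) && !(PySem.Set.contains fs.2 p.1) then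
            (PySem.Set.add fs.1 p.1, PySem.Set.add fs.2 p.1)
          else fs)
        (frontier', seen)
      pvBfsB admat flows fuel fs.1 fs.2 order'

def bfs_morgan_order_extended_by_admat_alt (admat : List (List Int)) : List Int × (List (Int × Int)) :=
  let flows0 := admat.map List.sum
  let k0 := (PySem.Set.ofList flows0).length
  let flows := pvMorganB admat (admat.length + 1) flows0 k0
  -- min(range(len(admat)), key=…); ValueError on an empty range is excluded by Pre_
  let root := PySem.List.minD (PySem.List.pyRange 0 (admat.length : Int) 1) (pvKeyB flows) 0
  let order := pvBfsB admat flows admat.length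
    (PySem.Set.ofList [root]) (PySem.Set.ofList [root]) []
  (order, ((PySem.List.enumerate order).foldl
    (fun d (p : Int × Int) => d.insert p.2 p.1) PySem.Dict.empty).items)

-- ===== PRECONDITION & SPEC =====
-- Pre_ excludes exactly the inputs where the Python A raises: the empty matrix (ValueError from
-- min() of an empty dict) and matrices with a nonzero entry whose column index is ≥ len(admat)
-- (KeyError id2flow[j] in the relaxation).
def Pre_bfs_morgan_order_extended_by_admat (admat : List (List Int)) : Prop :=
  admat ≠ [] ∧ ∀ row ∈ admat, ∀ j : Fin row.length, row[j] ≠ 0 → (j : Nat) < admat.length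
instance (admat : List (List Int)) : Decidable (Pre_bfs_morgan_order_extended_by_admat admat) := by
  unfold Pre_bfs_morgan_order_extended_by_admat; infer_instance

def pvWitness_bfs_morgan_order_extended_by_admat : List (List Int) := [[0, 1], [1, 0]]

def Spec_bfs_morgan_order_extended_by_admat (admat : List (List Int)) (out : List Int × (List (Int × Int))) : Prop := out = bfs_morgan_order_extended_by_admat_alt admat
instance (admat : List (List Int)) (out : List Int × (List (Int × Int))) : Decidable (Spec_bfs_morgan_order_extended_by_admat admat out) := by unfold Spec_bfs_morgan_order_extended_by_admat; infer_instance

-- ===== CLAIM (what is proved, stated in full; the proofs are below) =====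
def Claim_equal_bfs_morgan_order_extended_by_admat : Prop := ∀ (admat : List (List Int)), Dom_bfs_morgan_order_extended_by_admat admat → Pre_bfs_morgan_order_extended_by_admat admat → Spec_bfs_morgan_order_extended_by_admat admat (bfs_morgan_order_extended_by_admat admat)

-- ===== LEMMAS AND PROOFS =====
-- batch 1 lemmas
def pvKeyA (flows : List Int) (j : Int) : Int × Int := (PySem.List.pyGetD flows j 0, j)

theorem pvLexLt_iff (p q : Int × Int) : pvLexLt p q = true ↔ toLex p < toLex q := by
  rw [Prod.Lex.lt_iff]
  simp [pvLexLt]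

theorem pvKeyA_inj (flows : List Int) {i j : Int} (h : pvKeyA flows i = pvKeyA flows j) : i = j := by
  simpa [pvKeyA] using congrArg Prod.snd h

theorem pvHeapPush_perm (h : List (Int × Int)) (x : Int × Int) :
    (pvHeapPush h x).Perm (x :: h) := by
  induction h with
  | nil => simp [pvHeapPush]
  | cons q t ih =>
    by_cases hq : pvLexLt x q = true
    · simp [pvHeapPush, hq]
    · simp only [pvHeapPush, hq]
      exact ((ih.cons q).trans (List.Perm.swap x q t))

theorem pvHeapPush_sorted {h : List (Int × Int)} {x : Int × Int}
    (hs : h.Pairwise (fun p q => pvLexLt p q = true))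
    (hx : ∀ q ∈ h, q ≠ x) :
    (pvHeapPush h x).Pairwise (fun p q => pvLexLt p q = true) := by
  induction h with
  | nil => simp [pvHeapPush]
  | cons q t ih =>
    rcases List.pairwise_cons.mp hs with ⟨hq, ht⟩
    by_cases hlt : pvLexLt x q = true
    · simp only [pvHeapPush, hlt, if_true]
      refine List.pairwise_cons.mpr ⟨?_, hs⟩
      intro y hy
      rcases List.mem_cons.mp hy with rfl | hy
      · exact hlt
      · exact (pvLexLt_iff _ _).mpr (lt_trans ((pvLexLt_iff _ _).mp hlt)
          ((pvLexLt_iff _ _).mp (hq _ hy)))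
    · simp only [pvHeapPush, hlt]
      refine List.pairwise_cons.mpr ⟨?_, ih ht (fun y hy => hx y (List.mem_cons_of_mem _ hy))⟩
      intro y hy
      have hy2 := (pvHeapPush_perm t x).mem_iff.mp hy
      rcases List.mem_cons.mp hy2 with rfl | hy2
      · rcases lt_trichotomy (toLex q) (toLex y) with h1 | h1 | h1
        · exact (pvLexLt_iff _ _).mpr h1
        · exact absurd (toLex.injective h1) fun hh => (hx q List.mem_cons_self) hh
        · exact absurd ((pvLexLt_iff _ _).mpr h1) (by simpa using hlt)
      · exact hq _ hy2
-- batch 2: min? characterisation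
def pvMinStep {α κ : Type} [LT κ] [DecidableLT κ] (key : α → κ) (acc : Option α) (x : α) : Option α :=
  match acc with
  | none => some x
  | some c => if key x < key c then some x else some c

theorem pvMin?_eq_foldl {α κ : Type} [LT κ] [DecidableLT κ] (key : α → κ) (l : List α) :
    PySem.List.min? l key = l.foldl (pvMinStep key) none := rfl

theorem pvFoldMin_spec {α κ : Type} [LinearOrder κ] (key : α → κ) (l : List α) :
    ∀ (a : α), ∃ m, l.foldl (pvMinStep key) (some a) = some m ∧ (m = a ∨ m ∈ l) ∧
      key m ≤ key a ∧ ∀ y ∈ l, key m ≤ key y := by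
  induction l with
  | nil => exact fun a => ⟨a, rfl, Or.inl rfl, le_refl _, by simp⟩
  | cons x t ih =>
    intro a
    by_cases hx : key x < key a
    · obtain ⟨m, hm, hmem, hle, hall⟩ := ih x
      refine ⟨m, by simpa [pvMinStep, hx] using hm, ?_, hle.trans hx.le, ?_⟩
      · rcases hmem with rfl | h
        · exact Or.inr List.mem_cons_self
        · exact Or.inr (List.mem_cons_of_mem _ h)
      · intro y hy
        rcases List.mem_cons.mp hy with rfl | hy
        · exact hle
        · exact hall y hy
    · obtain ⟨m, hm, hmem, hle, hall⟩ := ih a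
      refine ⟨m, by simpa [pvMinStep, hx] using hm, ?_, hle, ?_⟩
      · rcases hmem with rfl | h
        · exact Or.inl rfl
        · exact Or.inr (List.mem_cons_of_mem _ h)
      · intro y hy
        rcases List.mem_cons.mp hy with rfl | hy
        · exact hle.trans (not_lt.mp hx)
        · exact hall y hy

theorem pvMin?_spec {α κ : Type} [LinearOrder κ] (key : α → κ) {l : List α} (hl : l ≠ []) :
    ∃ m, PySem.List.min? l key = some m ∧ m ∈ l ∧ ∀ y ∈ l, key m ≤ key y := by
  cases l with
  | nil => exact absurd rfl hl
  | cons x t =>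
    obtain ⟨m, hm, hmem, hle, hall⟩ := pvFoldMin_spec key t x
    refine ⟨m, ?_, ?_, ?_⟩
    · rw [pvMin?_eq_foldl]
      simpa [List.foldl_cons, pvMinStep] using hm
    · rcases hmem with rfl | h
      · exact List.mem_cons_self
      · exact List.mem_cons_of_mem _ h
    · intro y hy
      rcases List.mem_cons.mp hy with rfl | hy
      · exact hle
      · exact hall y hy

theorem pvMin?_map {α β κ : Type} [LT κ] [DecidableLT κ] (g : α → β) (key : β → κ) (l : List α) :
    PySem.List.min? (l.map g) key = (PySem.List.min? l (fun x => key (g x))).map g := by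
  rw [pvMin?_eq_foldl, pvMin?_eq_foldl]
  suffices h : ∀ acc : Option α,
      (l.map g).foldl (pvMinStep key) (acc.map g) = (l.foldl (pvMinStep fun x => key (g x)) acc).map g by
    simpa using h none
  induction l with
  | nil => intro acc; simp
  | cons x t ih =>
    intro acc
    cases acc with
    | none => simpa [pvMinStep] using ih (some x)
    | some c =>
      by_cases hc : key (g x) < key (g c)
      · simpa [pvMinStep, hc] using ih (some x)
      · simpa [pvMinStep, hc] using ih (some c)

theorem pvMin?_toLexSnd (f : Int → Int) (l : List Int) (hl : l.Pairwise (· < ·)) :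
    PySem.List.min? l (fun j => toLex (f j, j)) = PySem.List.min? l f := by
  have aux : ∀ (t : List Int) (m : Int), (∀ x ∈ t, m < x) → t.Pairwise (· < ·) →
      t.foldl (pvMinStep fun j => toLex (f j, j)) (some m) = t.foldl (pvMinStep f) (some m) := by
    intro t
    induction t with
    | nil => intro m _ _; rfl
    | cons x t ih =>
      intro m hm hp
      rcases List.pairwise_cons.mp hp with ⟨hx, ht⟩
      have hiff : ((toLex (f x, x) : Lex (Int × Int)) < toLex (f m, m)) ↔ f x < f m := by
        rw [Prod.Lex.lt_iff]
        constructor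
        · rintro (h | ⟨h1, h2⟩)
          · exact h
          · exact absurd h2 (not_lt.mpr (hm x List.mem_cons_self).le)
        · exact Or.inl
      by_cases hc : f x < f m
      · simp only [List.foldl_cons, pvMinStep, if_pos hc, if_pos (hiff.mpr hc)]
        exact ih x hx ht
      · simp only [List.foldl_cons, pvMinStep, if_neg hc, if_neg (fun hh => hc (hiff.mp hh))]
        exact ih m (fun y hy => hm y (List.mem_cons_of_mem _ hy)) ht
  cases l with
  | nil => rfl
  | cons x t =>
    rw [pvMin?_eq_foldl, pvMin?_eq_foldl]
    simp only [List.foldl_cons, pvMinStep]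
    exact aux t x (List.pairwise_cons.mp hl).1 (List.pairwise_cons.mp hl).2
-- batch 3: dict-as-enumerated-list representation
theorem pvEnumerate_map {α β : Type} (f : α → β) (xs : List α) :
    ∀ s : Int, PySem.List.enumerate (xs.map f) s
      = (PySem.List.enumerate xs s).map (fun p => (p.1, f p.2)) := by
  induction xs with
  | nil => intro s; rfl
  | cons x t ih => intro s; simp [PySem.List.enumerate_cons, ih]

theorem pvDictEnum_get? (flows : List Int) :
    ∀ (s j : Int), (PySem.Dict.mk (PySem.List.enumerate flows s)).get? j
      = if s ≤ j then flows[(j - s).toNat]? else none := by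
  induction flows with
  | nil =>
    intro s j
    simp [PySem.Dict.get?, PySem.List.enumerate]
  | cons fl t ih =>
    intro s j
    rw [PySem.List.enumerate_cons, PySem.Dict.get?_mk_cons, ih (s + 1) j]
    by_cases hsj : s = j
    · subst hsj
      simp
    · have hbeq : (s == j) = false := by simpa using hsj
      rw [hbeq]
      simp only [Bool.false_eq_true, if_false]
      by_cases h1 : s + 1 ≤ j
      · have hs : s ≤ j := by omega
        have ht : (j - s).toNat = (j - (s + 1)).toNat + 1 := by omega
        simp [h1, hs, ht]
      · by_cases hs : s ≤ j
        · omega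
        · simp [h1, hs]

theorem pvDictEnum_getD (flows : List Int) (j : Int) (hj : 0 ≤ j) :
    (PySem.Dict.mk (PySem.List.enumerate flows 0)).getD j 0 = PySem.List.pyGetD flows j 0 := by
  rw [PySem.Dict.getD_eq_get?_getD, pvDictEnum_get? flows 0 j, PySem.List.pyGetD,
    PySem.List.pyGet?_of_nonneg flows hj]
  simp [hj]

theorem pvInsert_getD_self (d : PySem.Dict Int Int) (i : Int)
    (hc : d.contains i = true) (hnd : d.keys.Nodup) : d.insert i (d.getD i 0) = d := by
  apply PySem.Dict.ext
  rw [PySem.Dict.items_insert_of_contains d _ hc]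
  have : ∀ p ∈ d.items, (if (p.1 == i) = true then (i, d.getD i 0) else p) = p := by
    intro p hp
    by_cases hpi : p.1 = i
    · have hv : d.getD p.1 0 = p.2 := PySem.Dict.getD_of_mem_items d (by simpa using hp) hnd 0
      rw [if_pos (by simpa using hpi)]
      obtain ⟨p1, p2⟩ := p
      simp only at hpi hv
      rw [hpi] at hv ⊢
      rw [hv]
    · simp [hpi]
  rw [List.map_congr_left this, List.map_id']

theorem pvInnerFold (l : List (Int × Int)) :
    ∀ (d : PySem.Dict Int Int) (i : Int) (G : Int → Int),
      d.contains i = true → d.keys.Nodup →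
      l.foldl (fun d' p => if p.2 == 0 then d' else d'.insert i (d'.getD i 0 + G p.1)) d
        = d.insert i (d.getD i 0 + ((l.filter (fun p => !(p.2 == 0))).map (fun p => G p.1)).sum) := by
  induction l with
  | nil =>
    intro d i G hc hnd
    simpa using (pvInsert_getD_self d i hc hnd).symm
  | cons p t ih =>
    intro d i G hc hnd
    by_cases hp : p.2 = 0
    · simp only [List.foldl_cons, hp]
      rw [if_pos (by simpa using hp), ih d i G hc hnd]
      simp [hp]
    · simp only [List.foldl_cons]
      rw [if_neg (by simpa using hp),
        ih (d.insert i (d.getD i 0 + G p.1)) i G (PySem.Dict.contains_insert_self d i _)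
          (PySem.Dict.nodup_keys_insert d i _ hnd),
        PySem.Dict.getD_insert_self, PySem.Dict.insert_insert_self]
      have hf : (p :: t).filter (fun p => !(p.2 == 0)) = p :: t.filter (fun p => !(p.2 == 0)) := by
        simp [hp]
      rw [hf]
      simp [add_assoc]
-- batch 4: phase-1 row sums and the Morgan loop in lockstep
theorem pvEnumFilter_zero (t : List Int) :
    ∀ s : Int, (∀ j (hj : j < t.length), t[j] = 0) →
      (PySem.List.enumerate t s).filter (fun p => !(p.2 == 0)) = [] := by
  intro s hz
  rw [List.filter_eq_nil_iff]
  intro p hp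
  obtain ⟨k, hk, rfl⟩ := (PySem.List.mem_enumerate_iff t s p).mp hp
  simp [hz k hk]

theorem pvZipSum_aux (flows : List Int) :
    ∀ (row : List Int) (s : Nat),
      (∀ j (hj : j < row.length), row[j] ≠ 0 → s + j < flows.length) →
      (((PySem.List.enumerate row (s : Int)).filter (fun p => !(p.2 == 0))).map
          (fun p => PySem.List.pyGetD flows p.1 0)).sum
        = (((row.zip (flows.drop s)).filter (fun p => !(p.1 == 0))).map (fun p => p.2)).sum := by
  intro row
  induction row with
  | nil => intro s _; simp
  | cons r t ih =>
    intro s h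
    rw [PySem.List.enumerate_cons]
    have hcast : (s : Int) + 1 = ((s + 1 : Nat) : Int) := by push_cast; ring
    by_cases hr : r = 0
    · rw [List.filter_cons_of_neg (by simp [hr])]
      cases hdrop : flows.drop s with
      | nil =>
        have hlen : flows.length ≤ s := by
          by_contra hc
          have hslen : s < flows.length := by omega
          have := List.drop_eq_getElem_cons (l := flows) (i := s) hslen
          rw [hdrop] at this
          exact List.cons_ne_nil _ _ this.symm
        have hz : ∀ j (hj : j < t.length), t[j] = 0 := by
          intro j hj
          by_contra hne
          have := h (j + 1) (by simpa using Nat.succ_lt_succ hj) (by simpa using hne)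
          omega
        rw [hcast, pvEnumFilter_zero t _ hz]
        simp
      | cons f rest =>
        have hrest : flows.drop (s + 1) = rest := by
          rw [← List.tail_drop, hdrop]
          rfl
        rw [hcast, ih (s + 1) (by intro j hj hne; have := h (j + 1) (by simpa using Nat.succ_lt_succ hj) (by simpa using hne); omega), hrest]
        simp [hr]
    · have hs : s < flows.length := by
        have := h 0 (by simp) (by simpa using hr)
        omega
      have hdrop := List.drop_eq_getElem_cons (l := flows) (i := s) hs
      rw [List.filter_cons_of_pos (by simp [hr])]
      rw [hdrop, List.zip_cons_cons, List.filter_cons_of_pos (by simp [hr])]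
      have hrest : flows.drop (s + 1) = flows.drop (s + 1) := rfl
      rw [List.map_cons, List.map_cons, List.sum_cons, List.sum_cons]
      have hhead : PySem.List.pyGetD flows (s : Int) 0 = flows[s] := by
        rw [PySem.List.pyGetD, PySem.List.pyGet?_of_nonneg flows (by positivity)]
        simp [Int.toNat_natCast, List.getElem?_eq_getElem hs]
      rw [hhead, hcast, ih (s + 1) (by intro j hj hne; have := h (j + 1) (by simpa using Nat.succ_lt_succ hj) (by simpa using hne); omega)]

theorem pvZipSum (flows row : List Int)
    (h : ∀ j (hj : j < row.length), row[j] ≠ 0 → j < flows.length) :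
    (((PySem.List.enumerate row 0).filter (fun p => !(p.2 == 0))).map
        (fun p => PySem.List.pyGetD flows p.1 0)).sum
      = (((row.zip flows).filter (fun p => !(p.1 == 0))).map (fun p => p.2)).sum := by
  have := pvZipSum_aux flows row 0 (by simpa using h)
  simpa using this

theorem pvRelaxRowA_items (flow : PySem.Dict Int Int) (i : Int) (row : List Int)
    (nd : PySem.Dict Int Int) (hni : nd.contains i = false) (hnd : nd.keys.Nodup) :
    (pvRelaxRowA flow i row nd).items
      = nd.items ++ [(i, 0 + (((PySem.List.enumerate row 0).filter (fun p => !(p.2 == 0))).map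
          (fun p => flow.getD p.1 0)).sum)] := by
  rw [pvRelaxRowA, pvInnerFold _ _ _ (fun j => flow.getD j 0)
    (PySem.Dict.contains_insert_self nd i 0) (PySem.Dict.nodup_keys_insert nd i 0 hnd),
    PySem.Dict.getD_insert_self, PySem.Dict.insert_insert_self,
    PySem.Dict.items_insert_of_not_contains nd _ hni]
-- batch 5: one relaxation step and the whole Morgan loop, in lockstep
theorem pvStepB_length (admat : List (List Int)) (flows : List Int) :
    (pvStepB admat flows).length = admat.length := by
  simp [pvStepB]

theorem pvStepA_items (flows : List Int) (rows : List (List Int))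
    (hrow : ∀ row ∈ rows, ∀ j, (j < row.length) → (∀ h : j < row.length, row[j] ≠ 0) → j < flows.length) :
    (pvStepA rows (PySem.Dict.mk (PySem.List.enumerate flows 0))).items
      = PySem.List.enumerate (pvStepB rows flows) 0 := by
  induction rows using List.reverseRecOn with
  | nil => rfl
  | append_singleton rs r ih =>
    have hrow' : ∀ row ∈ rs, ∀ j, (j < row.length) → (∀ h : j < row.length, row[j] ≠ 0) → j < flows.length :=
      fun row hr => hrow row (List.mem_append_left _ hr)
    have ihit := ih hrow'
    rw [pvStepA, PySem.List.enumerate_append, List.foldl_append]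
    have hfold : (PySem.List.enumerate rs 0).foldl
        (fun nd p => pvRelaxRowA (PySem.Dict.mk (PySem.List.enumerate flows 0)) p.1 p.2 nd)
        PySem.Dict.empty = pvStepA rs (PySem.Dict.mk (PySem.List.enumerate flows 0)) := rfl
    rw [hfold]
    set dPrev := pvStepA rs (PySem.Dict.mk (PySem.List.enumerate flows 0)) with hdPrev
    have hkeys : dPrev.keys = PySem.List.pyRange 0 ((rs.length : Nat) : Int) 1 := by
      show dPrev.items.map (fun p => p.1) = _
      rw [ihit, PySem.List.map_fst_enumerate]
      rw [pvStepB_length]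
      norm_num
    have hnodup : dPrev.keys.Nodup := by
      rw [hkeys]
      exact (PySem.List.pairwise_lt_pyRange_one _ _).imp ne_of_lt
    have hcont : dPrev.contains ((rs.length : Nat) : Int) = false := by
      rw [← Bool.not_eq_true, PySem.Dict.contains_iff_mem_keys, hkeys]
      intro hmem
      have := PySem.List.mem_pyRange_one.mp hmem
      omega
    simp only [PySem.List.enumerate_cons, PySem.List.enumerate_nil, List.foldl_cons, List.foldl_nil, zero_add]
    rw [pvRelaxRowA_items _ _ _ _ hcont hnodup, ihit]
    have hsum : (((PySem.List.enumerate r 0).filter (fun p => !(p.2 == 0))).map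
          (fun p => (PySem.Dict.mk (PySem.List.enumerate flows 0)).getD p.1 0)).sum
        = (((r.zip flows).filter (fun p => !(p.1 == 0))).map (fun p => p.2)).sum := by
      rw [List.map_congr_left (fun p hp => ?_)]
      · exact pvZipSum flows r (by
          intro j hj hne
          exact hrow r (List.mem_append_right _ List.mem_cons_self) j hj (fun _ => hne))
      · have hp' := List.mem_of_mem_filter hp
        obtain ⟨k, hk, rfl⟩ := (PySem.List.mem_enumerate_iff r 0 p).mp hp'
        exact pvDictEnum_getD flows _ (by positivity)
    rw [hsum]
    simp [pvStepB, PySem.List.enumerate_append, PySem.List.enumerate_cons]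
theorem pvDictEnum_values (l : List Int) :
    (PySem.Dict.mk (PySem.List.enumerate l 0)).values = l := by
  show (PySem.List.enumerate l 0).map (fun p => p.2) = l
  exact PySem.List.map_snd_enumerate l 0

theorem pvMorgan_eq (admat : List (List Int))
    (hpre : ∀ row ∈ admat, ∀ j, (j < row.length) → (∀ h : j < row.length, row[j] ≠ 0) → j < admat.length) :
    ∀ (fuel : Nat) (flows : List Int) (k : Nat), flows.length = admat.length →
      pvMorganA admat fuel (PySem.Dict.mk (PySem.List.enumerate flows 0)) k
          = PySem.Dict.mk (PySem.List.enumerate (pvMorganB admat fuel flows k) 0)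
        ∧ (pvMorganB admat fuel flows k).length = admat.length := by
  intro fuel
  induction fuel with
  | zero => intro flows k hlen; exact ⟨rfl, hlen⟩
  | succ fuel ih =>
    intro flows k hlen
    have hnd : pvStepA admat (PySem.Dict.mk (PySem.List.enumerate flows 0))
        = PySem.Dict.mk (PySem.List.enumerate (pvStepB admat flows) 0) :=
      PySem.Dict.ext (pvStepA_items flows admat
        (by intro row hr j hj hne; rw [hlen]; exact hpre row hr j hj hne))
    simp only [pvMorganA, pvMorganB, hnd, pvDictEnum_values]
    by_cases hk : (PySem.Set.ofList (pvStepB admat flows)).length ≤ k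
    · simp only [if_pos hk]
      exact ⟨trivial, hlen⟩
    · simp only [if_neg hk]
      exact ih (pvStepB admat flows) _ (pvStepB_length admat flows)
-- batch 7: both programs pick the same root
theorem pvRange_ne_nil (n : Nat) (hn : n ≠ 0) : PySem.List.pyRange 0 (n : Int) 1 ≠ [] := by
  intro h
  have := PySem.List.length_pyRange_one 0 (n : Int)
  rw [h] at this
  simp at this
  omega

theorem pvRoot_eq (flows : List Int) (hne : flows ≠ []) :
    (PySem.List.minD (PySem.Dict.mk (PySem.List.enumerate flows 0)).items (fun x => x.2) (0, 0)).1
      = PySem.List.minD (PySem.List.pyRange 0 (flows.length : Int) 1) (pvKeyB flows) 0 := by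
  have hrne : PySem.List.pyRange 0 (flows.length : Int) 1 ≠ [] :=
    pvRange_ne_nil flows.length (by simpa using hne)
  obtain ⟨m, hm, hmem, hall⟩ := pvMin?_spec (fun j => PySem.List.pyGetD flows j 0) hrne
  have henum : PySem.List.enumerate flows
      = (PySem.List.pyRange 0 (flows.length : Int) 1).map
          (fun j => (j, PySem.List.pyGetD flows j 0)) := by
    simpa [PySem.List.len_eq] using PySem.List.enumerate_eq_map_pyRange flows (0 : Int)
  have hlex : PySem.List.min? (PySem.List.pyRange 0 (flows.length : Int) 1) (pvKeyB flows)
      = PySem.List.min? (PySem.List.pyRange 0 (flows.length : Int) 1)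
          (fun j => PySem.List.pyGetD flows j 0) := by
    have := pvMin?_toLexSnd (fun j => PySem.List.pyGetD flows j 0)
      (PySem.List.pyRange 0 (flows.length : Int) 1)
      (PySem.List.pairwise_lt_pyRange_one 0 (flows.length : Int))
    simpa [pvKeyB] using this
  simp only [PySem.List.minD]
  show ((PySem.List.min? (PySem.List.enumerate flows) fun x => x.2).getD (0, 0)).1 = _
  rw [henum, pvMin?_map, hlex, hm]
  simp
-- batch 8: the phase-2 invariant and the pop handshake
def pvInv (flows : List Int) (order : List Int) (heap : List (Int × Int))
    (visited : PySem.Dict Int Bool) (frontier seen : PySem.Set Int) : Prop :=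
  heap.Perm (frontier.map (pvKeyA flows)) ∧
  heap.Pairwise (fun p q => pvLexLt p q = true) ∧
  frontier.Nodup ∧
  (∀ j : Int, visited.contains j = true ↔ j ∈ seen) ∧
  (∀ i ∈ frontier, 0 ≤ i) ∧ (∀ i ∈ frontier, i ∈ seen) ∧
  (∀ i ∈ order, i ∈ seen) ∧ (∀ i ∈ frontier, i ∉ order) ∧ order.Nodup

theorem pvMapKeyA_nodup (flows : List Int) {frontier : List Int} (hnd : frontier.Nodup) :
    (frontier.map (pvKeyA flows)).Nodup :=
  hnd.map_on (fun x _ y _ h => pvKeyA_inj flows h)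

theorem pvPop (flows : List Int) {heap : List (Int × Int)} {frontier : PySem.Set Int}
    (hperm : heap.Perm (frontier.map (pvKeyA flows)))
    (hsort : heap.Pairwise (fun p q => pvLexLt p q = true))
    (hnd : frontier.Nodup) (hne : frontier ≠ []) :
    ∃ rest, heap = pvKeyA flows (PySem.List.minD frontier (pvKeyB flows) 0) :: rest ∧
      PySem.List.minD frontier (pvKeyB flows) 0 ∈ frontier ∧
      rest.Perm ((PySem.Set.discard frontier (PySem.List.minD frontier (pvKeyB flows) 0)).map
        (pvKeyA flows)) := by
  obtain ⟨m, hm, hmem, hall⟩ := pvMin?_spec (pvKeyB flows) hne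
  have hmind : PySem.List.minD frontier (pvKeyB flows) 0 = m := by
    simp [PySem.List.minD, hm]
  rw [hmind]
  have hheapne : heap ≠ [] := by
    intro h
    rw [h] at hperm
    have := hperm.nil_eq
    exact hne (by simpa using this.symm)
  obtain ⟨h, rest, rfl⟩ := List.exists_cons_of_ne_nil hheapne
  obtain ⟨y, hy, hyk⟩ := List.mem_map.mp (hperm.subset List.mem_cons_self)
  have hym : y = m := by
    have h1 : (pvKeyB flows m : Lex (Int × Int)) ≤ pvKeyB flows y := hall y hy
    have h2 : (pvKeyB flows y : Lex (Int × Int)) ≤ pvKeyB flows m := by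
      have hmmem : pvKeyA flows m ∈ h :: rest :=
        hperm.symm.subset (List.mem_map_of_mem hmem)
      rcases List.mem_cons.mp hmmem with heq | hrest
      · show (toLex (pvKeyA flows y) : Lex (Int × Int)) ≤ toLex (pvKeyA flows m)
        rw [heq, ← hyk]
      · have := (List.pairwise_cons.mp hsort).1 _ hrest
        rw [← hyk] at this
        exact (le_of_lt ((pvLexLt_iff _ _).mp this))
    have : (pvKeyB flows y : Lex (Int × Int)) = pvKeyB flows m := le_antisymm h2 h1
    exact pvKeyA_inj flows (toLex.injective this)
  subst hym
  refine ⟨rest, by rw [hyk], hmem, ?_⟩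
  have hmapnd := pvMapKeyA_nodup flows hnd
  have herase : rest.Perm ((frontier.map (pvKeyA flows)).erase (pvKeyA flows y)) := by
    have hc : (frontier.map (pvKeyA flows)).Perm
        (pvKeyA flows y :: (frontier.map (pvKeyA flows)).erase (pvKeyA flows y)) :=
      List.perm_cons_erase (List.mem_map_of_mem hmem)
    have h2 := hperm.trans hc
    rw [← hyk] at h2
    exact h2.cons_inv
  refine herase.trans (List.Perm.of_eq ?_)
  rw [(hmapnd.erase_eq_filter (pvKeyA flows y)), PySem.Set.discard]
  rw [List.filter_map]
  congr 1
  apply List.filter_congr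
  intro x hx
  show ((fun p => p != pvKeyA flows y) ∘ pvKeyA flows) x = !(x == y)
  by_cases hxy : x = y
  · subst hxy; simp
  · have hk : pvKeyA flows x ≠ pvKeyA flows y := fun hh => hxy (pvKeyA_inj flows hh)
    have h1 : (pvKeyA flows x == pvKeyA flows y) = false := beq_eq_false_iff_ne.mpr hk
    have h2 : (x == y) = false := beq_eq_false_iff_ne.mpr hxy
    simp [Function.comp, bne, h1, h2]
-- batch 9: pushing the unseen neighbours preserves the invariant, in lockstep
theorem pvNeighFold (dflow : PySem.Dict Int Int) (flows : List Int)
    (hflow : ∀ j : Int, 0 ≤ j → dflow.getD j 0 = PySem.List.pyGetD flows j 0)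
    (order : List Int) (l : List (Int × Int)) :
    ∀ (heap : List (Int × Int)) (visited : PySem.Dict Int Bool) (frontier seen : PySem.Set Int),
      (∀ p ∈ l, 0 ≤ p.1) →
      pvInv flows order heap visited frontier seen →
      pvInv flows order
        (l.foldl (fun (hv : List (Int × Int) × PySem.Dict Int Bool) p =>
          if p.2 == 0 then hv
          else if hv.2.contains p.1 then hv
          else (pvHeapPush hv.1 (dflow.getD p.1 0, p.1), hv.2.insert p.1 true)) (heap, visited)).1
        (l.foldl (fun (hv : List (Int × Int) × PySem.Dict Int Bool) p =>
          if p.2 == 0 then hv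
          else if hv.2.contains p.1 then hv
          else (pvHeapPush hv.1 (dflow.getD p.1 0, p.1), hv.2.insert p.1 true)) (heap, visited)).2
        (l.foldl (fun (fs : PySem.Set Int × PySem.Set Int) p =>
          if !(p.2 == 0) && !(PySem.Set.contains fs.2 p.1) then
            (PySem.Set.add fs.1 p.1, PySem.Set.add fs.2 p.1)
          else fs) (frontier, seen)).1
        (l.foldl (fun (fs : PySem.Set Int × PySem.Set Int) p =>
          if !(p.2 == 0) && !(PySem.Set.contains fs.2 p.1) then
            (PySem.Set.add fs.1 p.1, PySem.Set.add fs.2 p.1)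
          else fs) (frontier, seen)).2 := by
  induction l with
  | nil => intro heap visited frontier seen _ hinv; exact hinv
  | cons p t ih =>
    intro heap visited frontier seen hl hinv
    obtain ⟨hperm, hsort, hfnd, hvis, hpos, hfseen, hoseen, hford, hond⟩ := hinv
    have hp0 : 0 ≤ p.1 := hl p List.mem_cons_self
    have hlt : ∀ q ∈ t, 0 ≤ q.1 := fun q hq => hl q (List.mem_cons_of_mem _ hq)
    rw [List.foldl_cons, List.foldl_cons]
    by_cases hz : p.2 = 0
    · have ht : (p.2 == 0) = true := by simpa using hz
      simp only [ht, if_true, Bool.not_true, Bool.false_and, Bool.false_eq_true, if_false]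
      exact ih heap visited frontier seen hlt
        ⟨hperm, hsort, hfnd, hvis, hpos, hfseen, hoseen, hford, hond⟩
    · by_cases hseen : p.1 ∈ seen
      · have hf : (p.2 == 0) = false := by simpa using hz
        have hc1 : visited.contains p.1 = true := (hvis p.1).mpr hseen
        have hc2 : PySem.Set.contains seen p.1 = true := (PySem.Set.contains_iff seen p.1).mpr hseen
        simp only [hf, hc1, hc2, if_true, Bool.not_true, Bool.not_false, Bool.true_and,
          Bool.and_false, Bool.false_eq_true, if_false]
        exact ih heap visited frontier seen hlt
          ⟨hperm, hsort, hfnd, hvis, hpos, hfseen, hoseen, hford, hond⟩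
      · have hc1 : visited.contains p.1 = false := by
          rw [← Bool.not_eq_true]; exact fun hh => hseen ((hvis p.1).mp hh)
        have hc2 : PySem.Set.contains seen p.1 = false := by
          rw [← Bool.not_eq_true]; exact fun hh => hseen ((PySem.Set.contains_iff seen p.1).mp hh)
        have hkey : (dflow.getD p.1 0, p.1) = pvKeyA flows p.1 := by
          rw [pvKeyA, hflow p.1 hp0]
        have hpfr : p.1 ∉ frontier := fun hh => hseen (hfseen p.1 hh)
        have hf : (p.2 == 0) = false := by simpa using hz
        simp only [hf, hc1, hc2, Bool.not_false, Bool.true_and, Bool.false_eq_true, if_false,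
          if_true]
        apply ih _ _ _ _ hlt
        have hadd : PySem.Set.add frontier p.1 = frontier ++ [p.1] := PySem.Set.add_of_not_mem hpfr
        refine ⟨?_, ?_, ?_, ?_, ?_, ?_, ?_, ?_, hond⟩
        · rw [hkey, hadd, List.map_append]
          refine (pvHeapPush_perm heap (pvKeyA flows p.1)).trans ?_
          refine (List.Perm.cons _ hperm).trans ?_
          exact (List.perm_append_singleton _ _).symm
        · rw [hkey]
          refine pvHeapPush_sorted hsort ?_
          intro q hq hcontra
          obtain ⟨y, hy, hyk⟩ := List.mem_map.mp (hperm.subset hq)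
          rw [← hyk] at hcontra
          exact hpfr (pvKeyA_inj flows hcontra ▸ hy)
        · exact PySem.Set.nodup_add frontier p.1 hfnd
        · intro j
          rw [PySem.Dict.contains_insert, PySem.Set.mem_add]
          constructor
          · intro hh
            rcases Bool.or_eq_true_iff.mp hh with hh | hh
            · exact Or.inr (by simpa using hh)
            · exact Or.inl ((hvis j).mp hh)
          · intro hh
            rcases hh with hh | hh
            · exact Bool.or_eq_true_iff.mpr (Or.inr ((hvis j).mpr hh))
            · exact Bool.or_eq_true_iff.mpr (Or.inl (by simpa using hh))
        · intro i hi
          rcases (PySem.Set.mem_add frontier p.1 i).mp hi with hh | hh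
          · exact hpos i hh
          · exact hh ▸ hp0
        · intro i hi
          rcases (PySem.Set.mem_add frontier p.1 i).mp hi with hh | hh
          · exact (PySem.Set.mem_add seen p.1 i).mpr (Or.inl (hfseen i hh))
          · exact (PySem.Set.mem_add seen p.1 i).mpr (Or.inr hh)
        · intro i hi
          exact (PySem.Set.mem_add seen p.1 i).mpr (Or.inl (hoseen i hi))
        · intro i hi
          rcases (PySem.Set.mem_add frontier p.1 i).mp hi with hh | hh
          · exact hford i hh
          · exact hh ▸ fun hcon => hseen (hoseen _ hcon)
-- batch 10: the BFS loops in lockstep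
theorem pvIdx_keys (order : List Int) (idx : PySem.Dict Int Int)
    (h : idx.items = (PySem.List.enumerate order 0).map (fun p => (p.2, p.1))) :
    idx.keys = order := by
  show idx.items.map (fun p => p.1) = order
  rw [h, List.map_map]
  exact PySem.List.map_snd_enumerate order 0

theorem pvLoop (admat : List (List Int)) (dflow : PySem.Dict Int Int) (flows : List Int)
    (hflow : ∀ j : Int, 0 ≤ j → dflow.getD j 0 = PySem.List.pyGetD flows j 0) :
    ∀ (fuel : Nat) (heap : List (Int × Int)) (visited : PySem.Dict Int Bool)
      (order : List Int) (idx : PySem.Dict Int Int) (frontier seen : PySem.Set Int),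
      pvInv flows order heap visited frontier seen →
      idx.items = (PySem.List.enumerate order 0).map (fun p => (p.2, p.1)) →
      pvBfsA admat dflow fuel heap visited order idx
          = (pvBfsB admat flows fuel frontier seen order,
             (PySem.List.enumerate (pvBfsB admat flows fuel frontier seen order) 0).map
               (fun p => (p.2, p.1)))
        ∧ (pvBfsB admat flows fuel frontier seen order).Nodup := by
  intro fuel
  induction fuel with
  | zero =>
    intro heap visited order idx frontier seen hinv hidx
    refine ⟨?_, hinv.2.2.2.2.2.2.2.2⟩
    simp only [pvBfsA, pvBfsB]
    rw [hidx]
  | succ fuel ih =>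
    intro heap visited order idx frontier seen hinv hidx
    obtain ⟨hperm, hsort, hfnd, hvis, hpos, hfseen, hoseen, hford, hond⟩ := hinv
    cases hfr : frontier with
    | nil =>
      subst hfr
      have hheap : heap = [] := List.Perm.eq_nil (by simpa using hperm)
      subst hheap
      refine ⟨?_, hond⟩
      simp only [pvBfsA, pvBfsB]
      rw [hidx]
    | cons a fr =>
      subst hfr
      obtain ⟨rest, hheap, hmem, hrperm⟩ :=
        pvPop flows hperm hsort hfnd (List.cons_ne_nil a fr)
      set m := PySem.List.minD (a :: fr) (pvKeyB flows) 0 with hmdef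
      have hheap' : heap = (PySem.List.pyGetD flows m 0, m) :: rest := hheap
      have hmord : m ∉ order := hford m hmem
      have hm0 : 0 ≤ m := hpos m hmem
      -- reduce both programs one step
      rw [hheap']
      simp only [pvBfsA, pvBfsB]
      -- the new idx
      have hkeys : idx.keys = order := pvIdx_keys order idx hidx
      have hcont : idx.contains m = false := by
        rw [← Bool.not_eq_true, PySem.Dict.contains_iff_mem_keys, hkeys]
        exact hmord
      have hidx' : (idx.insert m (order.length : Int)).items
          = (PySem.List.enumerate (order ++ [m]) 0).map (fun p => (p.2, p.1)) := by
        rw [PySem.Dict.items_insert_of_not_contains idx _ hcont, hidx,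
          PySem.List.enumerate_append]
        simp [PySem.List.enumerate_cons]
      -- the invariant after popping m
      have hinv' : pvInv flows (order ++ [m]) rest visited
          (PySem.Set.discard (a :: fr) m) seen := by
        refine ⟨hrperm, (List.pairwise_cons.mp (hheap' ▸ hsort)).2, 
          PySem.Set.nodup_discard _ _ hfnd, hvis, ?_, ?_, ?_, ?_, ?_⟩
        · intro i hi
          exact hpos i ((PySem.Set.mem_discard _ _ _).mp hi).1
        · intro i hi
          exact hfseen i ((PySem.Set.mem_discard _ _ _).mp hi).1
        · intro i hi
          rcases List.mem_append.mp hi with hh | hh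
          · exact hoseen i hh
          · exact (List.mem_singleton.mp hh) ▸ hfseen m hmem
        · intro i hi hcon
          obtain ⟨hif, hine⟩ := (PySem.Set.mem_discard _ _ _).mp hi
          rcases List.mem_append.mp hcon with hh | hh
          · exact hford i hif hh
          · exact hine (List.mem_singleton.mp hh)
        · rw [List.nodup_append]
          refine ⟨hond, by simp, ?_⟩
          intro i hi b hb hib
          exact hmord ((hib.trans (List.mem_singleton.mp hb)) ▸ hi)
      have hinv'' := pvNeighFold dflow flows hflow (order ++ [m])
        (PySem.List.enumerate (PySem.List.pyGetD admat m []) 0) rest visited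
        (PySem.Set.discard (a :: fr) m) seen
        (by
          intro p hp
          obtain ⟨k, hk, rfl⟩ := (PySem.List.mem_enumerate_iff _ 0 p).mp hp
          simp)
        hinv'
      exact ih _ _ _ _ _ _ hinv'' hidx'
-- batch 11: assembling the whole program equivalence
theorem pvMain (admat : List (List Int))
    (hpre : Pre_bfs_morgan_order_extended_by_admat admat) :
    bfs_morgan_order_extended_by_admat admat = bfs_morgan_order_extended_by_admat_alt admat := by
  obtain ⟨hne, hrow⟩ := hpre
  have hn0 : admat.length ≠ 0 := fun h => hne (List.length_eq_zero_iff.mp h)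
  have hpre' : ∀ row ∈ admat, ∀ j, j < row.length →
      (∀ h : j < row.length, row[j] ≠ 0) → j < admat.length := by
    intro row hr j hj hnz
    exact hrow row hr ⟨j, hj⟩ (hnz hj)
  -- the initial flow dict is the enumerated row-sum list
  have h0 : (PySem.List.enumerate admat).foldl
      (fun (d : PySem.Dict Int Int) (p : Int × List Int) => d.insert p.1 p.2.sum)
      PySem.Dict.empty
      = PySem.Dict.mk (PySem.List.enumerate (admat.map List.sum) 0) := by
    apply PySem.Dict.ext
    rw [PySem.Dict.items_foldl_insert_fresh (PySem.List.enumerate admat) (fun p => p.1)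
      (fun p => p.2.sum) PySem.Dict.empty (fun a _ => rfl)
      (by
        rw [PySem.List.map_fst_enumerate]
        exact (PySem.List.pairwise_lt_pyRange_one _ _).imp ne_of_lt)]
    rw [pvEnumerate_map]
    rfl
  obtain ⟨hmor, hlen⟩ := pvMorgan_eq admat hpre' (admat.length + 1) (admat.map List.sum)
    ((PySem.Set.ofList (admat.map List.sum)).length) (by simp)
  set flows := pvMorganB admat (admat.length + 1) (admat.map List.sum)
    ((PySem.Set.ofList (admat.map List.sum)).length) with hflows
  have hflne : flows ≠ [] := by
    intro h
    rw [h] at hlen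
    exact hn0 hlen.symm
  have hflow : ∀ j : Int, 0 ≤ j →
      (PySem.Dict.mk (PySem.List.enumerate flows 0)).getD j 0 = PySem.List.pyGetD flows j 0 :=
    fun j hj => pvDictEnum_getD flows j hj
  have hroot : (PySem.List.minD
        (PySem.Dict.mk (PySem.List.enumerate flows 0)).items (fun x => x.2) (0, 0)).1
      = PySem.List.minD (PySem.List.pyRange 0 (admat.length : Int) 1) (pvKeyB flows) 0 := by
    rw [pvRoot_eq flows hflne, hlen]
  set r := PySem.List.minD (PySem.List.pyRange 0 (admat.length : Int) 1) (pvKeyB flows) 0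
    with hrdef
  have hr0 : 0 ≤ r := by
    obtain ⟨mm, hmm, hmmem, _⟩ := pvMin?_spec (pvKeyB flows) (pvRange_ne_nil admat.length hn0)
    have : r = mm := by rw [hrdef]; simp [PySem.List.minD, hmm]
    rw [this]
    exact (PySem.List.mem_pyRange_one.mp hmmem).1
  have hinv : pvInv flows [] [pvKeyA flows r] (PySem.Dict.empty.insert r true) [r] [r] := by
    refine ⟨by simp, List.pairwise_singleton _ _, List.nodup_singleton r, ?_, ?_, ?_, ?_, ?_, List.nodup_nil⟩
    · intro j
      rw [PySem.Dict.contains_insert]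
      simp [PySem.Dict.contains_empty]
    · intro i hi; rw [List.mem_singleton.mp hi]; exact hr0
    · intro i hi; exact hi
    · intro i hi; exact absurd hi (List.not_mem_nil)
    · intro i _ hi; exact absurd hi (List.not_mem_nil)
  obtain ⟨hloop, hnd⟩ := pvLoop admat (PySem.Dict.mk (PySem.List.enumerate flows 0)) flows hflow
    admat.length [pvKeyA flows r] (PySem.Dict.empty.insert r true) [] PySem.Dict.empty [r] [r]
    hinv rfl
  -- unfold A to the pvBfsA call
  have hA : bfs_morgan_order_extended_by_admat admat
      = pvBfsA admat (PySem.Dict.mk (PySem.List.enumerate flows 0)) admat.length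
          [pvKeyA flows r] (PySem.Dict.empty.insert r true) [] PySem.Dict.empty := by
    simp only [bfs_morgan_order_extended_by_admat]
    rw [h0, pvDictEnum_values, hmor, hroot]
    rw [hflow r hr0]
    rfl
  -- unfold B to the pvBfsB call
  have hofl : PySem.Set.ofList [r] = [r] :=
    PySem.Set.ofList_eq_self_of_nodup [r] (List.nodup_singleton r)
  have hB : bfs_morgan_order_extended_by_admat_alt admat
      = (pvBfsB admat flows admat.length [r] [r] [],
         ((PySem.List.enumerate (pvBfsB admat flows admat.length [r] [r] [])).foldl
           (fun (d : PySem.Dict Int Int) (p : Int × Int) => d.insert p.2 p.1)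
           PySem.Dict.empty).items) := by
    simp only [bfs_morgan_order_extended_by_admat_alt]
    rw [hofl]
  rw [hA, hB, hloop]
  -- the idx2order dict B builds afterwards is exactly A's incrementally built one
  congr 1
  rw [PySem.Dict.items_foldl_insert_fresh
    (PySem.List.enumerate (pvBfsB admat flows admat.length [r] [r] []) 0)
    (fun p => p.2) (fun p => p.1) PySem.Dict.empty (fun a _ => rfl)
    (by rw [PySem.List.map_snd_enumerate]; exact hnd)]
  rfl

-- ===== VERDICT (by name: the statement is the Claim_ definition above) =====
theorem bfs_morgan_order_extended_by_admat_spec : Claim_equal_bfs_morgan_order_extended_by_admat := by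
  intro admat _ hpre
  show bfs_morgan_order_extended_by_admat admat = bfs_morgan_order_extended_by_admat_alt admat
  exact pvMain admat hpre
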